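-- pv_equiv track=rewrite | github.com/dream-ze/AI_huoke- | backend/app/services/mvp_compliance_service.py | _calculate_traffic_light
-- ===== SOURCE A (Python) =====
-- from typing import Any, Dict, List, Optional, Tuple
--
-- def _calculate_traffic_light(total_score: int, risk_points: List[Dict]) -> str:
--     """
--     计算交通灯等级
--
--     规则：
--     - green: score < 25 且无高风险
--     - yellow: 25 <= score < 50 或有中等风险
--     - red: score >= 50 或有高风险
--
--     Args:
--         total_score: 总风险分
--         risk_points: 风险点列表
--
--     Returns:
--         "green" / "yellow" / "red"
--     """
--     # 检查是否有高风险
--     has_high_risk = any(rp.get("risk_level") == "high" or rp.get("severity") == "high" for rp in risk_points)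
--     has_medium_risk = any(rp.get("risk_level") == "medium" or rp.get("severity") == "medium" for rp in risk_points)
--
--     # 红灯：分数>=50 或存在高风险
--     if total_score >= 50 or has_high_risk:
--         return "red"
--
--     # 黄灯：分数>=25 或存在中等风险
--     if total_score >= 25 or has_medium_risk:
--         return "yellow"
--
--     # 绿灯：分数<25 且无中等及以上风险
--     return "green"
-- ===== SOURCE B (Python) =====
-- def _calculate_traffic_light(total_score, risk_points):
--     # classify score and risks independently, then take the worse light
--     score_light = "red" if total_score >= 50 else ("yellow" if total_score >= 25 else "green")
--     risk_light = "green"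
--     for rp in risk_points:
--         if rp.get("risk_level") == "high" or rp.get("severity") == "high":
--             risk_light = "red"
--             break
--         if rp.get("risk_level") == "medium" or rp.get("severity") == "medium":
--             risk_light = "yellow"
--     rank = {"green": 0, "yellow": 1, "red": 2}
--     return max(score_light, risk_light, key=lambda l: rank[l])
-- ===== Notes on version B (the rewrite author's own statement) =====
-- stated objective: alternative
-- what changed: Replaces A's two full any-scans combined in cascaded conditions by two independent classifiers (a score light and a single early-exit scan over risk_points producing a risk light) merged by taking the maximum under a severity rank map.
import Mathlib
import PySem

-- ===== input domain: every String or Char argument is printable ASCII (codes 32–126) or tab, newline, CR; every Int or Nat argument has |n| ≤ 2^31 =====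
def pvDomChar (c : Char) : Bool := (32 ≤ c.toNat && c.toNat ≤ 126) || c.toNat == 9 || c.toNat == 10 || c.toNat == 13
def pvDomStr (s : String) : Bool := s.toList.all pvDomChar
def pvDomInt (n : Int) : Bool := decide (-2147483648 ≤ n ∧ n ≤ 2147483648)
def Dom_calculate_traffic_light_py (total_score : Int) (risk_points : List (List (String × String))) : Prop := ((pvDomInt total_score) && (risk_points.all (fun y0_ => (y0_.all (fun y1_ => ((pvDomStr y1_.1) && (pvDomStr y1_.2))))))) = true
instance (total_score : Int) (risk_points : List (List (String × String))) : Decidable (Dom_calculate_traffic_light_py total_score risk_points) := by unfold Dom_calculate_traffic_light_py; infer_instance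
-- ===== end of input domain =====

-- B re-decomposes A's cascaded conditions into two independent classifiers (score light, early-exit risk light) merged by the worse rank; same values everywhere.

-- ===== PORT A =====
def calculate_traffic_light_py (total_score : Int) (risk_points : List (List (String × String))) : String :=
  let has_high_risk := risk_points.any (fun rp =>
    (PySem.Dict.ofList rp).get? "risk_level" == some "high" || (PySem.Dict.ofList rp).get? "severity" == some "high")
  let has_medium_risk := risk_points.any (fun rp =>
    (PySem.Dict.ofList rp).get? "risk_level" == some "medium" || (PySem.Dict.ofList rp).get? "severity" == some "medium")
  if total_score ≥ 50 || has_high_risk then "red"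
  else if total_score ≥ 25 || has_medium_risk then "yellow"
  else "green"

-- ===== PORT B =====
-- early-exit scan of Source B's for-loop: returns "red" on the first high, else "yellow" if any medium, else acc
def pvRiskScan : List (List (String × String)) → String → String
  | [], acc => acc
  | rp :: rest, acc =>
    if (PySem.Dict.ofList rp).get? "risk_level" == some "high" || (PySem.Dict.ofList rp).get? "severity" == some "high" then
      "red"
    else if (PySem.Dict.ofList rp).get? "risk_level" == some "medium" || (PySem.Dict.ofList rp).get? "severity" == some "medium" then
      pvRiskScan rest "yellow"
    else
      pvRiskScan rest acc

-- the rank map {"green": 0, "yellow": 1, "red": 2}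
def pvRank (l : String) : Nat :=
  if l = "red" then 2 else if l = "yellow" then 1 else 0

def calculate_traffic_light_py_alt (total_score : Int) (risk_points : List (List (String × String))) : String :=
  let score_light := if total_score ≥ 50 then "red" else if total_score ≥ 25 then "yellow" else "green"
  let risk_light := pvRiskScan risk_points "green"
  -- max(score_light, risk_light, key=rank): first argument wins ties
  if pvRank risk_light > pvRank score_light then risk_light else score_light

-- ===== PRECONDITION & SPEC =====
def Spec_calculate_traffic_light_py (total_score : Int) (risk_points : List (List (String × String))) (out : String) : Prop := out = calculate_traffic_light_py_alt total_score risk_points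
instance (total_score : Int) (risk_points : List (List (String × String))) (out : String) : Decidable (Spec_calculate_traffic_light_py total_score risk_points out) := by unfold Spec_calculate_traffic_light_py; infer_instance

-- ===== CLAIM (what is proved, stated in full; the proofs are below) =====
def Claim_equal_calculate_traffic_light_py : Prop := ∀ (total_score : Int) (risk_points : List (List (String × String))), Dom_calculate_traffic_light_py total_score risk_points → Spec_calculate_traffic_light_py total_score risk_points (calculate_traffic_light_py total_score risk_points)

-- ===== LEMMAS AND PROOFS =====

-- characterisation of B's early-exit scan in terms of A's two any-scans
theorem pvRiskScan_eq (l : List (List (String × String))) (acc : String) :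
    pvRiskScan l acc =
      if l.any (fun rp =>
          (PySem.Dict.ofList rp).get? "risk_level" == some "high" || (PySem.Dict.ofList rp).get? "severity" == some "high") then "red"
      else if l.any (fun rp =>
          (PySem.Dict.ofList rp).get? "risk_level" == some "medium" || (PySem.Dict.ofList rp).get? "severity" == some "medium") then "yellow"
      else acc := by
  induction l generalizing acc with
  | nil => simp [pvRiskScan]
  | cons rp rest ih =>
    simp only [pvRiskScan, List.any_cons]
    by_cases h : ((PySem.Dict.ofList rp).get? "risk_level" == some "high" || (PySem.Dict.ofList rp).get? "severity" == some "high") = true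
    · simp [h]
    · by_cases m : ((PySem.Dict.ofList rp).get? "risk_level" == some "medium" || (PySem.Dict.ofList rp).get? "severity" == some "medium") = true
      · simp [h, m, ih]
      · simp [h, m, ih]

-- ===== VERDICT (by name: the statement is the Claim_ definition above) =====
theorem calculate_traffic_light_py_spec : Claim_equal_calculate_traffic_light_py := by
  intro total_score risk_points _
  show _ = _
  unfold calculate_traffic_light_py calculate_traffic_light_py_alt
  rw [pvRiskScan_eq]
  by_cases hh : (risk_points.any (fun rp =>
      (PySem.Dict.ofList rp).get? "risk_level" == some "high" || (PySem.Dict.ofList rp).get? "severity" == some "high")) = true <;>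
  by_cases hm : (risk_points.any (fun rp =>
      (PySem.Dict.ofList rp).get? "risk_level" == some "medium" || (PySem.Dict.ofList rp).get? "severity" == some "medium")) = true <;>
  by_cases h50 : total_score ≥ 50 <;>
  by_cases h25 : total_score ≥ 25 <;>
  simp only [hh, hm, h50, h25, if_true, if_false, Bool.or_true, Bool.or_false,
    decide_eq_true_eq, pvRank] <;> rfl
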